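-- pv_equiv track=rewrite | github.com/eldor-fozilov/solving-algorithms-and-data-structures-problems- | medium problems/best_seat/best_seat.py | bestSeat
-- ===== SOURCE A (Python) =====
-- def bestSeat(seats):
--     best_seat = -1
--     start_idx = 0
--     max_space = 0
--
--     while start_idx < len(seats):
--         if seats[start_idx] == 0:
--             num_spaces = 0
--             end_idx = start_idx
--             while end_idx < len(seats) and seats[end_idx] == 0:
--                 end_idx += 1
--                 num_spaces += 1
--             if num_spaces > max_space:
--                 max_space = num_spaces
--                 best_seat = (start_idx + end_idx - 1) // 2
--             start_idx = end_idx
--         else: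
--             start_idx += 1
--     return best_seat
-- ===== SOURCE B (Python) =====
-- def bestSeat(seats):
--     # marker list: occupied positions with sentinels -1 and len(seats)
--     markers = [-1] + [i for i, s in enumerate(seats) if s != 0] + [len(seats)]
--     best_seat, max_space = -1, 0
--     for prev, cur in zip(markers, markers[1:]):
--         gap = cur - prev - 1
--         if gap > max_space:
--             best_seat, max_space = (prev + cur) // 2, gap
--     return best_seat
-- ===== Notes on version B (the rewrite author's own statement) =====
-- stated objective: alternative
-- what changed: Replaces the nested index-while scan over runs of zeros by a one-pass fold over consecutive pairs of a precomputed occupied-marker list with sentinels -1 and len(seats).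
import Mathlib
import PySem

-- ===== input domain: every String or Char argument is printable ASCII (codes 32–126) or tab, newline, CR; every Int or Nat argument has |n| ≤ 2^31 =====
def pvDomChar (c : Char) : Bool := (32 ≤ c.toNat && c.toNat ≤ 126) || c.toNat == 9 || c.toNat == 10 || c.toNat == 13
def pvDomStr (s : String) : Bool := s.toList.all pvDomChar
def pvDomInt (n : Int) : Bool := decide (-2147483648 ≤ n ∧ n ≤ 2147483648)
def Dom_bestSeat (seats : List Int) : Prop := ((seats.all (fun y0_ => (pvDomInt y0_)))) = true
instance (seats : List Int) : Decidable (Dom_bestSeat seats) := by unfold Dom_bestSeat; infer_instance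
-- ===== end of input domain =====

-- B replaces A's nested run-scanning while loops by a single fold over consecutive
-- pairs of a precomputed occupied-marker list with sentinels (objective: alternative).

-- ===== PORT A =====
-- inner while loop of A: returns (end_idx, num_spaces); every index read is
-- guarded by the loop condition, so List.getD is exact for Python's seats[i]
def bestSeatInner (seats : List Int) (endIdx : Nat) (numSpaces : Int) : Nat × Int :=
  if _h : endIdx < seats.length then
    if seats.getD endIdx 0 = 0 then
      bestSeatInner seats (endIdx + 1) (numSpaces + 1)
    else (endIdx, numSpaces)
  else (endIdx, numSpaces)
termination_by seats.length - endIdx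

-- the port of the outer loop needs this bound for termination
lemma bestSeatInner_fst_ge (seats : List Int) :
    ∀ k e num, seats.length - e ≤ k → e ≤ (bestSeatInner seats e num).1 := by
  intro k
  induction k with
  | zero =>
      intro e num hk
      unfold bestSeatInner
      split
      · omega
      · simp
  | succ k ih =>
      intro e num _hk
      unfold bestSeatInner
      split
      · split
        · have := ih (e + 1) (num + 1) (by omega)
          omega
        · simp
      · simp

lemma bestSeatInner_fst_gt (seats : List Int) (e : Nat) (num : Int)
    (h : e < seats.length) (hz : seats.getD e 0 = 0) :
    e < (bestSeatInner seats e num).1 := by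
  rw [bestSeatInner]
  simp only [h, hz, dite_true, if_true]
  have := bestSeatInner_fst_ge seats (seats.length - (e + 1)) (e + 1) (num + 1) (by omega)
  omega

-- outer while loop of A
def bestSeatOuter (seats : List Int) (startIdx : Nat) (best maxSpace : Int) : Int :=
  if h : startIdx < seats.length then
    if hz : seats.getD startIdx 0 = 0 then
      let r := bestSeatInner seats startIdx 0
      if r.2 > maxSpace then
        bestSeatOuter seats r.1 (PySem.Int.floordiv ((startIdx : Int) + (r.1 : Int) - 1) 2) r.2
      else
        bestSeatOuter seats r.1 best maxSpace
    else bestSeatOuter seats (startIdx + 1) best maxSpace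
  else best
termination_by seats.length - startIdx
decreasing_by
  · have := bestSeatInner_fst_gt seats startIdx 0 h hz; omega
  · have := bestSeatInner_fst_gt seats startIdx 0 h hz; omega
  · omega

def bestSeat (seats : List Int) : Int :=
  bestSeatOuter seats 0 (-1) 0

-- ===== PORT B =====
-- fold step over a (prev, cur) pair of consecutive markers
def bestSeatStep (acc : Int × Int) (pc : Int × Int) : Int × Int :=
  let gap := pc.2 - pc.1 - 1
  if gap > acc.2 then (PySem.Int.floordiv (pc.1 + pc.2) 2, gap) else acc

def bestSeat_alt (seats : List Int) : Int :=
  let markers : List Int :=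
    -1 :: (seats.zipIdx.filterMap (fun p => if p.1 ≠ 0 then some ((p.2 : Int)) else none)
            ++ [(seats.length : Int)])
  ((markers.zip markers.tail).foldl bestSeatStep (-1, 0)).1

-- ===== PRECONDITION & SPEC =====
def Spec_bestSeat (seats : List Int) (out : Int) : Prop := out = bestSeat_alt seats
instance (seats : List Int) (out : Int) : Decidable (Spec_bestSeat seats out) := by unfold Spec_bestSeat; infer_instance

-- ===== CLAIM (what is proved, stated in full; the proofs are below) =====
def Claim_equal_bestSeat : Prop := ∀ (seats : List Int), Dom_bestSeat seats → Spec_bestSeat seats (bestSeat seats)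

-- ===== LEMMAS AND PROOFS =====

-- markers of seats at indices ≥ i, with the trailing sentinel
def pvMarkersFrom (seats : List Int) (i : Nat) : List Int :=
  if _h : i < seats.length then
    (if seats.getD i 0 ≠ 0 then [(i : Int)] else []) ++ pvMarkersFrom seats (i + 1)
  else [(seats.length : Int)]
termination_by seats.length - i

-- recursive form of B's fold over consecutive pairs
def pvScan : List Int → Int × Int → Int
  | p :: c :: rest, acc => pvScan (c :: rest) (bestSeatStep acc (p, c))
  | _, acc => acc.1

lemma foldl_zip_tail_eq_pvScan :
    ∀ (l : List Int) (acc : Int × Int),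
      ((l.zip l.tail).foldl bestSeatStep acc).1 = pvScan l acc := by
  intro l
  induction l with
  | nil => intro acc; simp [pvScan]
  | cons a t ih =>
      intro acc
      cases t with
      | nil => simp [pvScan]
      | cons b t2 =>
          simp only [List.tail_cons, List.zip_cons_cons, List.foldl_cons, pvScan]
          exact ih (bestSeatStep acc (a, b))

lemma pvMarkersFrom_eq_filterMap (seats : List Int) :
    ∀ k i, seats.length - i ≤ k → i ≤ seats.length →
      pvMarkersFrom seats i =
        ((seats.drop i).zipIdx i).filterMap
            (fun p => if p.1 ≠ 0 then some ((p.2 : Int)) else none)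
          ++ [(seats.length : Int)] := by
  intro k
  induction k with
  | zero =>
      intro i hk hi
      have h : i = seats.length := by omega
      subst h
      rw [pvMarkersFrom]
      simp
  | succ k ih =>
      intro i hk hi
      by_cases h : i < seats.length
      · rw [pvMarkersFrom]
        rw [List.drop_eq_getElem_cons h]
        simp only [h, dite_true, List.zipIdx_cons, List.filterMap_cons]
        have hget : seats.getD i 0 = seats[i] := List.getD_eq_getElem seats 0 h
        rw [ih (i + 1) (by omega) (by omega), hget]
        by_cases hz : seats[i] = 0
        · simp [hz]
        · simp [hz]
      · have h' : i = seats.length := by omega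
        subst h'
        rw [pvMarkersFrom]
        simp

-- full characterisation of A's inner loop
lemma bestSeatInner_spec (seats : List Int) :
    ∀ k e num, seats.length - e ≤ k → e ≤ seats.length →
      e ≤ (bestSeatInner seats e num).1 ∧
      (bestSeatInner seats e num).1 ≤ seats.length ∧
      (bestSeatInner seats e num).2 = num + (((bestSeatInner seats e num).1 - e : Nat) : Int) ∧
      pvMarkersFrom seats e = pvMarkersFrom seats (bestSeatInner seats e num).1 ∧
      ((bestSeatInner seats e num).1 = seats.length ∨
        seats.getD (bestSeatInner seats e num).1 0 ≠ 0) := by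
  intro k
  induction k with
  | zero =>
      intro e num hk he
      have h : e = seats.length := by omega
      rw [bestSeatInner]
      simp [h]
  | succ k ih =>
      intro e num hk he
      by_cases h : e < seats.length
      · by_cases hz : seats.getD e 0 = 0
        · rw [bestSeatInner]
          simp only [h, hz, dite_true, if_true]
          obtain ⟨h1, h2, h3, h4, h5⟩ := ih (e + 1) (num + 1) (by omega) (by omega)
          refine ⟨by omega, h2, by omega, ?_, h5⟩
          rw [pvMarkersFrom]
          simp only [h, dite_true, hz]
          simpa using h4
        · rw [bestSeatInner]
          rw [dif_pos h, if_neg hz]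
          exact ⟨le_refl e, le_of_lt h, by simp, rfl, Or.inr hz⟩
      · have h' : e = seats.length := by omega
        rw [bestSeatInner]
        simp [h']

lemma pvMarkersFrom_head (seats : List Int) (e : Nat) (he : e ≤ seats.length)
    (h : e = seats.length ∨ seats.getD e 0 ≠ 0) :
    ∃ t, pvMarkersFrom seats e = (e : Int) :: t := by
  by_cases hlt : e < seats.length
  · have hz : seats.getD e 0 ≠ 0 := by
      rcases h with h | h
      · omega
      · exact h
    refine ⟨pvMarkersFrom seats (e + 1), ?_⟩
    rw [pvMarkersFrom]
    rw [dif_pos hlt, if_pos hz]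
    simp
  · have h' : e = seats.length := by omega
    refine ⟨[], ?_⟩
    rw [pvMarkersFrom]
    simp [h']

lemma bestSeatOuter_eq_pvScan (seats : List Int) :
    ∀ k start best maxSp, seats.length - start ≤ k → start ≤ seats.length → 0 ≤ maxSp →
      bestSeatOuter seats start best maxSp =
        pvScan (((start : Int) - 1) :: pvMarkersFrom seats start) (best, maxSp) := by
  intro k
  induction k with
  | zero =>
      intro start best maxSp hk hs hm
      have h : start = seats.length := by omega
      subst h
      rw [bestSeatOuter, pvMarkersFrom]
      have hm' : ¬ maxSp < 0 := by omega
      simp [pvScan, bestSeatStep, hm']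
  | succ k ih =>
      intro start best maxSp hk hs hm
      by_cases h : start < seats.length
      · by_cases hz : seats.getD start 0 = 0
        · -- zero run starting at start
          obtain ⟨h1, h2, h3, h4, h5⟩ :=
            bestSeatInner_spec seats (seats.length - start) start 0 (by omega) (by omega)
          set r := bestSeatInner seats start 0 with hr
          have hgt : start < r.1 := bestSeatInner_fst_gt seats start 0 h hz
          obtain ⟨t, ht⟩ := pvMarkersFrom_head seats r.1 h2 h5
          have hzero0 : ¬ ((r.1 : Int) - ((r.1 : Int) - 1) - 1 > (r.2 : Int)) := by omega
          have hnum : (r.1 : Int) - ((start : Int) - 1) - 1 = r.2 := by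
            rw [h3]; push_cast [Nat.cast_sub (le_of_lt hgt)]; ring
          rw [bestSeatOuter, dif_pos h, dif_pos hz]
          simp only [gt_iff_lt]
          rw [← hr, h4, ht]
          by_cases hcmp : r.2 > maxSp
          · rw [if_pos hcmp]
            rw [ih r.1 (PySem.Int.floordiv ((start : Int) + (r.1 : Int) - 1) 2) r.2
                  (by omega) h2 (by omega)]
            rw [ht]
            simp only [pvScan, bestSeatStep, hnum]
            rw [if_pos hcmp]
            have hmid : (start : Int) + (r.1 : Int) - 1 = ((start : Int) - 1) + (r.1 : Int) := by
              ring
            have hzero : ¬ ((r.1 : Int) - ((r.1 : Int) - 1) - 1 > r.2) := by omega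
            simp only [hzero, if_false, hmid]
          · rw [if_neg hcmp]
            rw [ih r.1 best maxSp (by omega) h2 hm]
            rw [ht]
            simp only [pvScan, bestSeatStep, hnum]
            rw [if_neg hcmp]
            have hzero : ¬ ((r.1 : Int) - ((r.1 : Int) - 1) - 1 > maxSp) := by omega
            simp only [hzero, if_false]
        · -- occupied at start
          rw [bestSeatOuter, dif_pos h, dif_neg hz]
          rw [ih (start + 1) best maxSp (by omega) (by omega) hm]
          have hms : pvMarkersFrom seats start =
              (start : Int) :: pvMarkersFrom seats (start + 1) := by
            rw [pvMarkersFrom, dif_pos h, if_pos hz]; simp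
          rw [hms]
          have hc : (((start + 1 : Nat)) : Int) - 1 = (start : Int) := by push_cast; ring
          rw [hc]
          have hgap : ¬ ((start : Int) - ((start : Int) - 1) - 1 > maxSp) := by omega
          simp only [pvScan, bestSeatStep, hgap, if_false]
      · have h' : start = seats.length := by omega
        subst h'
        rw [bestSeatOuter, pvMarkersFrom]
        have hm' : ¬ maxSp < 0 := by omega
        simp [pvScan, bestSeatStep, hm']

-- ===== VERDICT (by name: the statement is the Claim_ definition above) =====
theorem bestSeat_spec : Claim_equal_bestSeat := by
  intro seats _hdom
  unfold Spec_bestSeat bestSeat bestSeat_alt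
  rw [foldl_zip_tail_eq_pvScan]
  have hm0 := pvMarkersFrom_eq_filterMap seats seats.length 0 (by omega) (by omega)
  simp only [List.drop_zero] at hm0
  rw [← hm0]
  have := bestSeatOuter_eq_pvScan seats seats.length 0 (-1) 0 (by omega) (by omega) (by omega)
  simpa using this
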